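-- pv_equiv track=rewrite | github.com/HariharanV04/SAP-IS | BoomiToIS-API/template_based_converter.py | _generate_sequence_flows_section
-- ===== SOURCE A (Python) =====
-- from typing import Dict, List, Any
--
-- def _generate_sequence_flows_section(endpoints: List[Dict[str, Any]]) -> str:
--     """Generate sequence flows section"""
--     flows_xml = []
--
--     for endpoint in endpoints:
--         components = endpoint.get("components", [])
--
--         if len(components) == 0:
--             # No components - direct flow from start to end
--             flows_xml.append('    <bpmn2:sequenceFlow id="flow_start_to_end" sourceRef="StartEvent_2" targetRef="EndEvent_2"/>')
--         elif len(components) == 1: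
--             # Single component
--             flows_xml.append(f'    <bpmn2:sequenceFlow id="flow_start_to_first" sourceRef="StartEvent_2" targetRef="{components[0]["id"]}"/>')
--             flows_xml.append(f'    <bpmn2:sequenceFlow id="flow_last_to_end" sourceRef="{components[0]["id"]}" targetRef="EndEvent_2"/>')
--         else:
--             # Multiple components
--             flows_xml.append(f'    <bpmn2:sequenceFlow id="flow_start_to_first" sourceRef="StartEvent_2" targetRef="{components[0]["id"]}"/>')
--
--             for i in range(len(components) - 1):
--                 flows_xml.append(f'    <bpmn2:sequenceFlow id="flow_{i}_to_{i+1}" sourceRef="{components[i]["id"]}" targetRef="{components[i+1]["id"]}"/>')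
--
--             flows_xml.append(f'    <bpmn2:sequenceFlow id="flow_last_to_end" sourceRef="{components[-1]["id"]}" targetRef="EndEvent_2"/>')
--
--     return "\n".join(flows_xml)
-- ===== SOURCE B (Python) =====
-- def _generate_sequence_flows_section(endpoints):
--     """Generate sequence flows section (node-path pair decomposition)."""
--     flows_xml = []
--     for endpoint in endpoints:
--         ids = [c["id"] for c in endpoint.get("components", [])]
--         nodes = ["StartEvent_2"] + ids + ["EndEvent_2"]
--         n = len(ids)
--         for j in range(len(nodes) - 1):
--             if n == 0:
--                 fid = "flow_start_to_end"
--             elif j == 0: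
--                 fid = "flow_start_to_first"
--             elif j == n:
--                 fid = "flow_last_to_end"
--             else:
--                 fid = f"flow_{j-1}_to_{j}"
--             flows_xml.append(f'    <bpmn2:sequenceFlow id="{fid}" sourceRef="{nodes[j]}" targetRef="{nodes[j+1]}"/>')
--     return "\n".join(flows_xml)
-- ===== Notes on version B (the rewrite author's own statement) =====
-- stated objective: alternative
-- what changed: Replaces A's three-way branch on len(components) with an inner index loop by one uniform pass over consecutive pairs of the node path Start :: component ids :: End, assigning each flow id by pair position.
import Mathlib
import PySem

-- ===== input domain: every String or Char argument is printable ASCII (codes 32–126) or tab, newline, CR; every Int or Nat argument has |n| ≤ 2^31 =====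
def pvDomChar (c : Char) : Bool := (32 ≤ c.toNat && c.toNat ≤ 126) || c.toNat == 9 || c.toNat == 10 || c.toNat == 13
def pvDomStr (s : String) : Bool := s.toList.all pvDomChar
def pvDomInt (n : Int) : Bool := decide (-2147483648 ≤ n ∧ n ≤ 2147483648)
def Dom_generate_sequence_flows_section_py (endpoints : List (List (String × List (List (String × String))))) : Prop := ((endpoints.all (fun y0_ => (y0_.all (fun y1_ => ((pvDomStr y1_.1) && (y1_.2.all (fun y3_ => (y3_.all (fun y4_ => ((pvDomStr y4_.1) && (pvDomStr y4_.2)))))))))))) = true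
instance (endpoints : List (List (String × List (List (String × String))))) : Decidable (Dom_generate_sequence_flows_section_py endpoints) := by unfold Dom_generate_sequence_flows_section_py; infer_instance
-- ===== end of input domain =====

-- B rebuilds each endpoint's flow list as one uniform pass over consecutive pairs of the
-- node path Start :: component ids :: End, instead of A's three-way branch with an inner
-- index loop; objective: alternative (same cost, single loop instead of case analysis).

-- shared helpers: dict lookup (first match) with default, and c["id"] with "" for the
-- KeyError case (KeyError inputs are excluded by Pre_)
def pvLookupD {α : Type} (d : List (String × α)) (k : String) (dflt : α) : α :=
  match d.find? (fun p => p.1 == k) with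
  | some p => p.2
  | none => dflt

def pvIdOf (c : List (String × String)) : String := pvLookupD c "id" ""

-- ===== PORT A =====
-- one endpoint's iteration of A's loop body (flows_xml is the accumulator)
def pvStepA (flows_xml : List String) (endpoint : List (String × List (List (String × String)))) : List String :=
  let components := pvLookupD endpoint "components" []
  if components.length = 0 then
    flows_xml ++ ["    <bpmn2:sequenceFlow id=\"flow_start_to_end\" sourceRef=\"StartEvent_2\" targetRef=\"EndEvent_2\"/>"]
  else if components.length = 1 then
    (flows_xml ++ ["    <bpmn2:sequenceFlow id=\"flow_start_to_first\" sourceRef=\"StartEvent_2\" targetRef=\"" ++ pvIdOf (PySem.List.pyGetD components 0 []) ++ "\"/>"])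
      ++ ["    <bpmn2:sequenceFlow id=\"flow_last_to_end\" sourceRef=\"" ++ pvIdOf (PySem.List.pyGetD components 0 []) ++ "\" targetRef=\"EndEvent_2\"/>"]
  else
    let fx := flows_xml ++ ["    <bpmn2:sequenceFlow id=\"flow_start_to_first\" sourceRef=\"StartEvent_2\" targetRef=\"" ++ pvIdOf (PySem.List.pyGetD components 0 []) ++ "\"/>"]
    let fx := (PySem.List.pyRange 0 ((components.length : Int) - 1) 1).foldl (fun acc i =>
      acc ++ ["    <bpmn2:sequenceFlow id=\"flow_" ++ PySem.Int.toStr i ++ "_to_" ++ PySem.Int.toStr (i + 1) ++ "\" sourceRef=\"" ++ pvIdOf (PySem.List.pyGetD components i []) ++ "\" targetRef=\"" ++ pvIdOf (PySem.List.pyGetD components (i + 1) []) ++ "\"/>"]) fx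
    fx ++ ["    <bpmn2:sequenceFlow id=\"flow_last_to_end\" sourceRef=\"" ++ pvIdOf (PySem.List.pyGetD components (-1) []) ++ "\" targetRef=\"EndEvent_2\"/>"]

def generate_sequence_flows_section_py (endpoints : List (List (String × List (List (String × String))))) : String :=
  PySem.Str.join "\n" (endpoints.foldl pvStepA [])

-- ===== PORT B =====
-- one endpoint's iteration of B's loop body: node path, then one pass over consecutive pairs
def pvStepB (flows_xml : List String) (endpoint : List (String × List (List (String × String)))) : List String :=
  let ids := (pvLookupD endpoint "components" []).map pvIdOf
  let nodes := "StartEvent_2" :: (ids ++ ["EndEvent_2"])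
  let n := ids.length
  (PySem.List.pyRange 0 ((nodes.length : Int) - 1) 1).foldl (fun acc j =>
    let fid :=
      if n = 0 then "flow_start_to_end"
      else if j = 0 then "flow_start_to_first"
      else if j = (n : Int) then "flow_last_to_end"
      else "flow_" ++ PySem.Int.toStr (j - 1) ++ "_to_" ++ PySem.Int.toStr j
    acc ++ ["    <bpmn2:sequenceFlow id=\"" ++ fid ++ "\" sourceRef=\"" ++ PySem.List.pyGetD nodes j "" ++ "\" targetRef=\"" ++ PySem.List.pyGetD nodes (j + 1) "" ++ "\"/>"]) flows_xml

def generate_sequence_flows_section_py_alt (endpoints : List (List (String × List (List (String × String))))) : String :=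
  PySem.Str.join "\n" (endpoints.foldl pvStepB [])

-- ===== PRECONDITION & SPEC =====
-- Pre_ excludes exactly the inputs on which Python A raises KeyError: a component dict
-- (first-match value of "components") without an "id" key.
def Pre_generate_sequence_flows_section_py (endpoints : List (List (String × List (List (String × String))))) : Prop :=
  ∀ ep ∈ endpoints, ∀ c ∈ pvLookupD ep "components" [], (c.find? (fun p => p.1 == "id")).isSome
instance (endpoints : List (List (String × List (List (String × String))))) : Decidable (Pre_generate_sequence_flows_section_py endpoints) := by unfold Pre_generate_sequence_flows_section_py; infer_instance

def pvWitness_generate_sequence_flows_section_py : (List (List (String × List (List (String × String))))) :=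
  [[("components", [[("id", "a1")], [("id", "b2")]])], []]

def Spec_generate_sequence_flows_section_py (endpoints : List (List (String × List (List (String × String))))) (out : String) : Prop := out = generate_sequence_flows_section_py_alt endpoints
instance (endpoints : List (List (String × List (List (String × String))))) (out : String) : Decidable (Spec_generate_sequence_flows_section_py endpoints out) := by unfold Spec_generate_sequence_flows_section_py; infer_instance

-- ===== CLAIM (what is proved, stated in full; the proofs are below) =====
def Claim_equal_generate_sequence_flows_section_py : Prop := ∀ (endpoints : List (List (String × List (List (String × String))))), Dom_generate_sequence_flows_section_py endpoints → Pre_generate_sequence_flows_section_py endpoints → Spec_generate_sequence_flows_section_py endpoints (generate_sequence_flows_section_py endpoints)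

-- ===== LEMMAS AND PROOFS =====

lemma pvNodesGet {α : Type} (S E : String) (f : α → String) (l : List α) (k : Nat) (hk : k < l.length) :
    PySem.List.pyGetD (S :: (l.map f ++ [E])) ((k + 1 : Nat) : Int) "" = f l[k] := by
  rw [PySem.List.pyGetD_natCast]
  rw [List.getD_cons_succ]
  rw [List.getD_eq_getElem _ _ (by simpa using Nat.lt_succ_of_lt (by simpa using hk))]
  rw [List.getElem_append_left (by simpa using hk)]
  simp

lemma pvNodesGetEnd {α : Type} (S E : String) (f : α → String) (l : List α) :
    PySem.List.pyGetD (S :: (l.map f ++ [E])) ((l.length + 1 : Nat) : Int) "" = E := by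
  rw [PySem.List.pyGetD_natCast]
  rw [List.getD_cons_succ]
  simp [List.getD]

lemma pvStep_eq (acc : List String) (ep : List (String × List (List (String × String)))) :
    pvStepA acc ep = pvStepB acc ep := by
  unfold pvStepA pvStepB
  generalize pvLookupD ep "components" [] = cs
  match cs with
  | [] =>
    norm_num [PySem.List.pyRange_one_cons, PySem.List.pyRange_one_eq_nil, PySem.List.pyGetD_zero_cons, PySem.List.pyGetD_ofNat']
    apply String.toList_inj.mp; simp [String.toList_append]
  | [c] =>
    norm_num [PySem.List.pyRange_one_cons, PySem.List.pyRange_one_eq_nil, PySem.List.pyGetD_zero_cons, PySem.List.pyGetD_ofNat']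
    and_intros <;> (apply String.toList_inj.mp; simp [String.toList_append])
  | c0 :: c1 :: rest =>
    simp only [List.length_cons, List.map_cons, List.length_map, List.length_append]
    rw [PySem.List.foldl_append_singleton_eq_map, PySem.List.foldl_append_singleton_eq_map]
    norm_num
    rw [show ((rest.length:Int) + 1 + 1 + 1) = ((rest.length:Int) + 2) + 1 by ring]
    rw [PySem.List.pyRange_one_append 0 1 (((rest.length:Int)+2)+1) (by omega) (by omega)]
    rw [PySem.List.pyRange_one_append 1 ((rest.length:Int)+2) (((rest.length:Int)+2)+1) (by omega) (by omega)]
    rw [PySem.List.pyRange_one_cons (by omega : (0:Int) < 1)]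
    norm_num [PySem.List.pyRange_one_eq_nil, PySem.List.pyRange_one_singleton,
      List.map_cons, List.map_append, List.map_nil]
    refine ⟨?_, ?_, ?_⟩
    · rw [show ("StartEvent_2" :: pvIdOf c0 :: pvIdOf c1 :: (List.map pvIdOf rest ++ ["EndEvent_2"])) = "StartEvent_2" :: (List.map pvIdOf (c0 :: c1 :: rest) ++ ["EndEvent_2"]) from by simp]
      rw [show (1:Int) = ((0 + 1 : Nat) : Int) by norm_num,
          pvNodesGet "StartEvent_2" "EndEvent_2" pvIdOf (c0 :: c1 :: rest) 0 (by simp)]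
      apply String.toList_inj.mp; simp
    · rw [PySem.List.pyRange_one 0, PySem.List.pyRange_one 1]
      rw [show ((rest.length:Int) + 1 - 0).toNat = rest.length + 1 by omega,
          show ((rest.length:Int) + 2 - 1).toNat = rest.length + 1 by omega]
      simp only [List.map_map]
      apply List.map_congr_left
      intro k hk
      have hk' : k < rest.length + 1 := List.mem_range.mp hk
      simp only [Function.comp_apply]
      rw [if_neg (by omega), if_neg (by omega)]
      rw [show (0 : Int) + (k:Int) = ((k:Nat) : Int) by omega]
      rw [show (1 : Int) + (k:Int) = (((k:Nat)+1) : Int) by omega]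
      rw [show ((k:Int) + 1 - 1) = ((k:Int)) from by ring]
      rw [show ("StartEvent_2" :: pvIdOf c0 :: pvIdOf c1 :: (List.map pvIdOf rest ++ ["EndEvent_2"])) = "StartEvent_2" :: (List.map pvIdOf (c0 :: c1 :: rest) ++ ["EndEvent_2"]) from by simp]
      rw [show ((k:Int) + 1) = (((k+1 : Nat)) : Int) from by push_cast; ring]
      rw [show (((k+1 : Nat) : Int) + 1) = (((k+1+1 : Nat)) : Int) from by push_cast; ring]
      rw [pvNodesGet _ _ pvIdOf (c0 :: c1 :: rest) k (by simp; omega)]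
      rw [pvNodesGet _ _ pvIdOf (c0 :: c1 :: rest) (k+1) (by simp; omega)]
      rw [PySem.List.pyGetD_natCast, PySem.List.pyGetD_natCast]
      rw [List.getD_eq_getElem _ _ (by simp; omega), List.getD_eq_getElem _ _ (by simp; omega)]
      apply String.toList_inj.mp; simp
    · rw [show ("StartEvent_2" :: pvIdOf c0 :: pvIdOf c1 :: (List.map pvIdOf rest ++ ["EndEvent_2"])) = "StartEvent_2" :: (List.map pvIdOf (c0 :: c1 :: rest) ++ ["EndEvent_2"]) from by simp]
      rw [if_neg (by omega), if_pos (by ring)]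
      rw [show ((rest.length:Int) + 2) = (((rest.length + 1) + 1 : Nat) : Int) by push_cast; ring,
          pvNodesGet "StartEvent_2" "EndEvent_2" pvIdOf (c0 :: c1 :: rest) (rest.length+1) (by simp)]
      rw [show ((((rest.length+1) + 1 : Nat)) : Int) + 1 = (((c0 :: c1 :: rest).length + 1 : Nat) : Int) by simp,
          pvNodesGetEnd "StartEvent_2" "EndEvent_2" pvIdOf (c0 :: c1 :: rest)]
      rw [PySem.List.pyGetD_neg_ofNat (c0 :: c1 :: rest) 1 [] (by omega) (by simp)]
      simp only [List.length_cons, Nat.add_sub_cancel]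
      apply String.toList_inj.mp; simp

-- ===== VERDICT (by name: the statement is the Claim_ definition above) =====
theorem generate_sequence_flows_section_py_spec : Claim_equal_generate_sequence_flows_section_py := by
  intro endpoints _ _
  unfold Spec_generate_sequence_flows_section_py generate_sequence_flows_section_py generate_sequence_flows_section_py_alt
  have h : pvStepA = pvStepB := funext fun a => funext fun e => pvStep_eq a e
  rw [h]
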